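-- pv_equiv track=rewrite | github.com/traviszhao96-cmd/nothing_pulse | nt_cam_pulse/youtube_comments.py | _map_models_to_tags
-- ===== SOURCE A (Python) =====
-- def _map_models_to_tags(models: list[str]) -> list[str]:
--     mapping = {
--         "phone_3": "phone3",
--         "phone_3a": "3a",
--         "phone_3a_pro": "3a pro",
--         "phone_4a": "4a",
--         "phone_4a_pro": "4a pro",
--     }
--     output: list[str] = []
--     for model in models:
--         tag = mapping.get(model)
--         if tag and tag not in output:
--             output.append(tag)
--     return output
-- ===== SOURCE B (Python) =====
-- def _map_models_to_tags(models: list[str]) -> list[str]: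
--     mapping = {
--         "phone_3": "phone3",
--         "phone_3a": "3a",
--         "phone_3a_pro": "3a pro",
--         "phone_4a": "4a",
--         "phone_4a_pro": "4a pro",
--     }
--     # Invert the traversal: loop over the (fixed, injective) mapping rather than over
--     # the models; each tag appears at most once by construction, so no dedup test is
--     # needed, and sorting by the key's first position in `models` restores A's order.
--     firsts = [(models.index(key), tag) for key, tag in mapping.items() if key in models]
--     firsts.sort(key=lambda p: p[0])
--     return [tag for _, tag in firsts]
-- ===== Notes on version B (the rewrite author's own statement) =====
-- stated objective: alternative
-- what changed: B loops over the fixed mapping instead of the models: it records the first index of each present key, sorts those (index, tag) pairs by index, and emits the tags; the dedup membership test disappears because the mapping's tags are distinct.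
import Mathlib
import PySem

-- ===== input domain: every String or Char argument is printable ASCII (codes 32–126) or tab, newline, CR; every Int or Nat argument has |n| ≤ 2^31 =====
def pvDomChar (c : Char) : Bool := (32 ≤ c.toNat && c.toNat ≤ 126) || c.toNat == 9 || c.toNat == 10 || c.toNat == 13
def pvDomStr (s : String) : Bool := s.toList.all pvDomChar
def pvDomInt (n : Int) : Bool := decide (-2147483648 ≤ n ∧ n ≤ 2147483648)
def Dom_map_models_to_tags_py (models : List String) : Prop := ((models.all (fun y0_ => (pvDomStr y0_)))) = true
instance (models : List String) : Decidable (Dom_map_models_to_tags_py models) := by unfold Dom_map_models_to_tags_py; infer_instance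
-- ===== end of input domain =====

-- B inverts the traversal: it loops over the fixed mapping (not over the models), pairs each
-- present key's first index in models with its tag, sorts by index and emits the tags — the
-- dedup membership test disappears (objective: alternative; no speed claim).

-- ===== PORT A =====
-- the function-level literal dict, built by insertion as in the Python source
def pvMapping : PySem.Dict String String :=
  (((((PySem.Dict.empty.insert "phone_3" "phone3").insert "phone_3a" "3a").insert
      "phone_3a_pro" "3a pro").insert "phone_4a" "4a").insert "phone_4a_pro" "4a pro")

-- the loop body: 'tag = mapping.get(model); if tag and tag not in output: output.append(tag)'
def pvStep (output : List String) (model : String) : List String :=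
  match PySem.Dict.get? pvMapping model with
  | none => output
  | some tag => if tag ≠ "" ∧ tag ∉ output then output ++ [tag] else output

def map_models_to_tags_py (models : List String) : List String :=
  models.foldl pvStep []

-- ===== PORT B =====
-- mapping.items(), in insertion order
def pvItems : List (String × String) :=
  [("phone_3", "phone3"), ("phone_3a", "3a"), ("phone_3a_pro", "3a pro"),
   ("phone_4a", "4a"), ("phone_4a_pro", "4a pro")]

-- firsts = [(models.index(key), tag) for key, tag in mapping.items() if key in models]
def pvFirsts (models : List String) : List (Nat × String) :=
  pvItems.filterMap (fun kt => (PySem.List.index? models kt.1).map (fun i => (i, kt.2)))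

-- firsts.sort(key=lambda p: p[0]); return [tag for _, tag in firsts]
def map_models_to_tags_py_alt (models : List String) : List String :=
  (PySem.List.sorted (pvFirsts models) (fun p => p.1)).map (fun p => p.2)

-- ===== PRECONDITION & SPEC =====
def Spec_map_models_to_tags_py (models : List String) (out : List String) : Prop :=
  out = map_models_to_tags_py_alt models
instance (models : List String) (out : List String) :
    Decidable (Spec_map_models_to_tags_py models out) := by
  unfold Spec_map_models_to_tags_py; infer_instance

-- ===== CLAIM =====
def Claim_equal_map_models_to_tags_py : Prop :=
  ∀ (models : List String), Dom_map_models_to_tags_py models →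
    Spec_map_models_to_tags_py models (map_models_to_tags_py models)

-- ===== LEMMAS AND PROOFS =====

-- the dict lookup is exactly membership in pvItems (the five keys are distinct)
theorem pv_get_iff (m t : String) :
    PySem.Dict.get? pvMapping m = some t ↔ (m, t) ∈ pvItems := by
  have h : pvMapping.items = pvItems := by decide
  simp only [PySem.Dict.get?, h, pvItems, List.find?]
  by_cases h1 : m = "phone_3" <;> by_cases h2 : m = "phone_3a" <;>
    by_cases h3 : m = "phone_3a_pro" <;> by_cases h4 : m = "phone_4a" <;>
    by_cases h5 : m = "phone_4a_pro" <;>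
    simp_all <;> aesop

-- every tag in the mapping is a non-empty string (so 'if tag' is just 'tag is not None')
theorem pv_tag_ne (m t : String) (h : (m, t) ∈ pvItems) : t ≠ "" := by
  simp [pvItems, Prod.ext_iff] at h
  rcases h with ⟨_,h⟩|⟨_,h⟩|⟨_,h⟩|⟨_,h⟩|⟨_,h⟩ <;> subst h <;> decide

-- the mapping is injective: a tag determines its key
theorem pv_key_inj (k₁ k₂ t : String) (h₁ : (k₁, t) ∈ pvItems) (h₂ : (k₂, t) ∈ pvItems) :
    k₁ = k₂ := by
  simp [pvItems, Prod.ext_iff] at h₁ h₂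
  rcases h₁ with ⟨h,h'⟩|⟨h,h'⟩|⟨h,h'⟩|⟨h,h'⟩|⟨h,h'⟩ <;>
    rcases h₂ with ⟨g,g'⟩|⟨g,g'⟩|⟨g,g'⟩|⟨g,g'⟩|⟨g,g'⟩ <;> subst h <;> subst g <;> simp_all

-- first index over an appended singleton
theorem pv_index_append (ms : List String) (m k : String) :
    PySem.List.index? (ms ++ [m]) k =
      match PySem.List.index? ms k with
      | some i => some i
      | none => if k = m then some ms.length else none := by
  induction ms with
  | nil =>
      simp only [List.nil_append, PySem.List.index?, List.idxOf?_cons, List.idxOf?_nil]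
      by_cases h : k = m
      · subst h; simp
      · have hmk : (m == k) = false := by
          simp only [beq_eq_false_iff_ne, ne_eq]; exact fun e => h e.symm
        simp [hmk, h]
  | cons a ms ih =>
      simp only [PySem.List.index?] at ih ⊢
      by_cases ha : a == k
      · simp [List.idxOf?_cons, ha]
      · simp only [List.cons_append, List.idxOf?_cons, ha, Bool.false_eq_true, if_false]
        rw [ih]
        cases h : List.idxOf? k ms <;> simp [h] <;> by_cases hk : k = m <;>
          simp [hk, List.length_cons]

-- which tags A's loop has accumulated: exactly those of acc plus those of keys seen so far
theorem pv_mem_foldl (ms : List String) (acc : List String) (t : String) :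
    t ∈ ms.foldl pvStep acc ↔ t ∈ acc ∨ ∃ k, (k, t) ∈ pvItems ∧ k ∈ ms := by
  induction ms generalizing acc with
  | nil => simp
  | cons m ms ih =>
      rw [List.foldl_cons, ih]
      have hstep : t ∈ pvStep acc m ↔ t ∈ acc ∨ (m, t) ∈ pvItems := by
        unfold pvStep
        cases hm : PySem.Dict.get? pvMapping m with
        | none =>
            constructor
            · exact Or.inl
            · rintro (h | h)
              · exact h
              · exact absurd ((pv_get_iff m t).mpr h) (by simp [hm])
        | some tag =>
            have htag : (m, tag) ∈ pvItems := (pv_get_iff m tag).mp hm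
            have hne := pv_tag_ne m tag htag
            by_cases hmem : tag ∈ acc
            · simp only [hne, ne_eq, not_false_iff, hmem, not_true_eq_false,
                and_false, if_false]
              constructor
              · exact Or.inl
              · rintro (h | h)
                · exact h
                · have : tag = t := by
                    have := (pv_get_iff m t).mpr h
                    rw [hm] at this; exact (Option.some_inj.mp this)
                  exact this ▸ hmem
            · simp only [hne, ne_eq, not_false_iff, true_and, hmem, if_pos,
                List.mem_append, List.mem_singleton]
              constructor
              · rintro (h | h)
                · exact Or.inl h
                · exact Or.inr (h ▸ htag)
              · rintro (h | h)
                · exact Or.inl h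
                · have : tag = t := by
                    have := (pv_get_iff m t).mpr h
                    rw [hm] at this; exact (Option.some_inj.mp this)
                  exact Or.inr this.symm
      rw [hstep]
      simp only [List.mem_cons]
      constructor
      · rintro ((h | h) | ⟨k, hk, hkm⟩)
        · exact Or.inl h
        · exact Or.inr ⟨m, h, Or.inl rfl⟩
        · exact Or.inr ⟨k, hk, Or.inr hkm⟩
      · rintro (h | ⟨k, hk, hkm | hkm⟩)
        · exact Or.inl (Or.inl h)
        · exact Or.inl (Or.inr (hkm ▸ hk))
        · exact Or.inr ⟨k, hk, hkm⟩

-- replacing one 'none' by 'some y' in a nodup filterMap appends y, up to permutation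
theorem pv_filterMap_perm {β γ : Type} (l : List β) (f g : β → Option γ) (x : β) (y : γ)
    (hnd : l.Nodup) (hx : x ∈ l) (hfx : f x = none) (hgx : g x = some y)
    (hag : ∀ z ∈ l, z ≠ x → g z = f z) :
    (l.filterMap g).Perm (l.filterMap f ++ [y]) := by
  induction l with
  | nil => simp at hx
  | cons a l ih =>
      rcases List.mem_cons.mp hx with rfl | hxl
      · have hxl : x ∉ l := (List.nodup_cons.mp hnd).1
        have hfg : l.filterMap g = l.filterMap f := by
          apply List.filterMap_congr
          intro z hz
          exact hag z (List.mem_cons_of_mem _ hz) (fun e => hxl (e ▸ hz))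
        simp only [List.filterMap_cons, hgx, hfx, hfg]
        exact (List.perm_append_singleton y (l.filterMap f)).symm
      · have hax : a ≠ x := fun e => (List.nodup_cons.mp hnd).1 (e ▸ hxl)
        have hga : g a = f a := hag a List.mem_cons_self hax
        have ih' := ih (List.nodup_cons.mp hnd).2 hxl
          (fun z hz hzx => hag z (List.mem_cons_of_mem _ hz) hzx)
        rw [List.filterMap_cons, List.filterMap_cons, hga]
        cases h : f a with
        | none => simpa [h] using ih'
        | some b => simpa [h] using ih'.cons b

-- indices occurring in pvFirsts are genuine positions in models, hence bounded …
theorem pv_firsts_lt (ms : List String) (p : Nat × String) (hp : p ∈ pvFirsts ms) :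
    p.1 < ms.length := by
  simp only [pvFirsts, List.mem_filterMap, Option.map_eq_some_iff] at hp
  obtain ⟨kt, _, i, hi, rfl⟩ := hp
  simp only [PySem.List.index?] at hi
  exact (List.idxOf?_eq_some_iff.mp hi).1

theorem pv_idx_key (ms : List String) (k : String) (i : Nat)
    (h : PySem.List.index? ms k = some i) : ∃ hh : i < ms.length, ms[i] = k := by
  simp only [PySem.List.index?] at h
  obtain ⟨hh, he, _⟩ := List.idxOf?_eq_some_iff.mp h
  exact ⟨hh, he⟩

-- … and pairwise distinct (distinct keys sit at distinct positions)
theorem pv_firsts_ne (ms : List String) :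
    List.Pairwise (fun p q : Nat × String => p.1 ≠ q.1) (pvFirsts ms) := by
  have hitems : List.Pairwise (fun a b : String × String => a.1 ≠ b.1) pvItems := by decide
  rw [pvFirsts, List.pairwise_filterMap]
  refine hitems.imp_of_mem ?_
  intro a b _ _ hab p hp q hq
  simp only [Option.map_eq_some_iff] at hp hq
  obtain ⟨i, hi, rfl⟩ := hp
  obtain ⟨j, hj, rfl⟩ := hq
  intro he
  obtain ⟨hii, hik⟩ := pv_idx_key ms a.1 i hi
  obtain ⟨hjj, hjk⟩ := pv_idx_key ms b.1 j hj
  simp only at he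
  subst he
  exact hab (hik ▸ hjk)

theorem pvStep_none (out : List String) (m : String)
    (hm : PySem.Dict.get? pvMapping m = none) : pvStep out m = out := by
  unfold pvStep; rw [hm]

theorem pvStep_some (out : List String) (m tag : String)
    (hm : PySem.Dict.get? pvMapping m = some tag) :
    pvStep out m = if tag ≠ "" ∧ tag ∉ out then out ++ [tag] else out := by
  unfold pvStep; rw [hm]

-- main induction: appending one model appends (at most) one tag on both sides
theorem pv_main (ms : List String) :
    ms.foldl pvStep [] = map_models_to_tags_py_alt ms := by
  induction ms using List.reverseRecOn with
  | nil => decide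
  | append_singleton ms m ih =>
      have hA : ((ms ++ [m]).foldl pvStep []) = pvStep (ms.foldl pvStep []) m := by
        simp [List.foldl_append]
      rw [hA]
      cases hm : PySem.Dict.get? pvMapping m with
      | none =>
          rw [pvStep_none _ _ hm]
          have hfe : pvFirsts (ms ++ [m]) = pvFirsts ms := by
            unfold pvFirsts
            apply List.filterMap_congr
            intro kt hkt
            have hkm : kt.1 ≠ m := by
              intro e
              have h1 : (m, kt.2) ∈ pvItems := by rw [← e]; exact hkt
              have := (pv_get_iff m kt.2).mpr h1
              rw [hm] at this; cases this
            rw [pv_index_append]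
            cases h : PySem.List.index? ms kt.1 <;> simp [hkm]
          rw [ih]
          unfold map_models_to_tags_py_alt
          rw [hfe]
      | some tag =>
          rw [pvStep_some _ _ _ hm]
          have htag : (m, tag) ∈ pvItems := (pv_get_iff m tag).mp hm
          have hne := pv_tag_ne m tag htag
          by_cases hmem : m ∈ ms
          · have hin : tag ∈ ms.foldl pvStep [] :=
              (pv_mem_foldl ms [] tag).mpr (Or.inr ⟨m, htag, hmem⟩)
            rw [if_neg (by simp [hin])]
            have hfe : pvFirsts (ms ++ [m]) = pvFirsts ms := by
              unfold pvFirsts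
              apply List.filterMap_congr
              intro kt hkt
              rw [pv_index_append]
              cases h : PySem.List.index? ms kt.1 with
              | some i => simp
              | none =>
                  have : kt.1 ∉ ms := by
                    simpa [PySem.List.index?, List.idxOf?_eq_none_iff] using h
                  have hkm : kt.1 ≠ m := fun e => this (e ▸ hmem)
                  simp [hkm]
            rw [ih]
            unfold map_models_to_tags_py_alt
            rw [hfe]
          · have hnin : tag ∉ ms.foldl pvStep [] := by
              rw [pv_mem_foldl]
              rintro (h | ⟨k, hk, hkm⟩)
              · simp at h
              · exact hmem ((pv_key_inj k m tag hk htag) ▸ hkm)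
            rw [if_pos ⟨hne, hnin⟩, ih]
            have hperm : (pvFirsts (ms ++ [m])).Perm (pvFirsts ms ++ [(ms.length, tag)]) := by
              apply pv_filterMap_perm pvItems _ _ (m, tag) (ms.length, tag) (by decide) htag
              · simp only
                have h0 : PySem.List.index? ms m = none := by
                  simp [PySem.List.index?, List.idxOf?_eq_none_iff, hmem]
                rw [h0]; rfl
              · simp only
                rw [pv_index_append]
                have h0 : PySem.List.index? ms m = none := by
                  simp [PySem.List.index?, List.idxOf?_eq_none_iff, hmem]
                rw [h0]; simp
              · intro z hz hzx
                have hkm : z.1 ≠ m := by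
                  intro e
                  have h1 : (m, z.2) ∈ pvItems := by rw [← e]; exact hz
                  have h2 := (pv_get_iff m z.2).mpr h1
                  rw [hm] at h2
                  apply hzx
                  have : z.2 = tag := by injection h2.symm
                  calc z = (z.1, z.2) := rfl
                    _ = (m, tag) := by rw [e, this]
                rw [pv_index_append]
                cases h : PySem.List.index? ms z.1 <;> simp [hkm]
            have hx_lt : ∀ p ∈ PySem.List.sorted (pvFirsts ms) (fun p : Nat × String => p.1),
                p.1 < ms.length := fun p hp =>
              pv_firsts_lt ms p ((PySem.List.sorted_perm (pvFirsts ms) _ false).mem_iff.mp hp)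
            have hsne : List.Pairwise (fun p q : Nat × String => p.1 ≠ q.1)
                (PySem.List.sorted (pvFirsts ms) (fun p => p.1)) :=
              ((PySem.List.sorted_perm (pvFirsts ms) _ false).pairwise_iff
                (fun h => Ne.symm h)).mpr (pv_firsts_ne ms)
            have hsle := PySem.List.sorted_pairwise (pvFirsts ms) (fun p : Nat × String => p.1)
            have hslt : List.Pairwise (fun p q : Nat × String => p.1 < q.1)
                (PySem.List.sorted (pvFirsts ms) (fun p => p.1)) := by
              refine (hsle.and hsne).imp ?_
              rintro p q ⟨h1, h2⟩
              exact lt_of_le_of_ne h1 h2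
            have hsorted_eq : PySem.List.sorted (pvFirsts (ms ++ [m])) (fun p => p.1) =
                PySem.List.sorted (pvFirsts ms) (fun p => p.1) ++ [(ms.length, tag)] := by
              apply PySem.List.sorted_eq_of_perm_of_pairwise_lt
              · exact ((PySem.List.sorted_perm (pvFirsts ms) _ false).append_right _).trans
                  hperm.symm
              · rw [List.pairwise_append]
                exact ⟨hslt, List.pairwise_singleton _ _,
                  fun p hp q hq => by
                    rw [List.mem_singleton] at hq
                    subst hq
                    exact hx_lt p hp⟩
            unfold map_models_to_tags_py_alt
            rw [hsorted_eq, List.map_append]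
            rfl

-- ===== VERDICT =====
theorem map_models_to_tags_py_spec : Claim_equal_map_models_to_tags_py := by
  intro models _
  unfold Spec_map_models_to_tags_py map_models_to_tags_py
  exact pv_main models
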